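-- pv_equiv track=rewrite | github.com/cutehammond772/problem-solving-archive | 백준/Platinum/11717. Wall Making Game/Wall Making Game.py | solve
-- ===== SOURCE A (Python) =====
-- def solve(H, W, board):
-- 	memo = [[-1] * 400 for _ in range(400)]
--
-- 	# 단일 칸에 대해 미리 계산
-- 	for h in range(H):
-- 		for w in range(W):
-- 			memo[h * W + w][h * W + w] = 1 if board[h][w] == '.' else 0
--
-- 	def mex(sequence):
-- 		count = [0] * (max(sequence) + 1)
--
-- 		for num in sequence:
-- 			count[num] += 1
--
-- 		for x in range(len(count)):
-- 			if not count[x]: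
-- 				return x
--
-- 		return len(count)
--
-- 	def game(h1, w1, h2, w2):
-- 		p1, p2 = h1 * W + w1, h2 * W + w2
--
-- 		# 유효하지 않은 보드인 경우
-- 		if h1 > h2 or w1 > w2:
-- 			return 0
--
-- 		# 이미 계산된 경우 반환
-- 		if memo[p1][p2] >= 0:
-- 			return memo[p1][p2]
--
-- 		# 스프라그-그런디
-- 		candidate = []
--
-- 		for h in range(h1, h2 + 1):
-- 			for w in range(w1, w2 + 1):
-- 				if board[h][w] == 'X':
-- 					continue
--
-- 				left_top = game(h1, w1, h - 1, w - 1)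
-- 				right_top = game(h1, w + 1, h - 1, w2)
-- 				left_bottom = game(h + 1, w1, h2, w - 1)
-- 				right_bottom = game(h + 1, w + 1, h2, w2)
--
-- 				candidate.append(left_top ^ right_top ^ left_bottom ^ right_bottom)
--
-- 		memo[p1][p2] = mex(candidate) if candidate else 0
-- 		return memo[p1][p2]
--
-- 	return game(0, 0, H - 1, W - 1)
-- ===== SOURCE B (Python) =====
-- def solve(H, W, board):
-- 	# Bottom-up DP over subrectangles ordered by increasing (height, width);
-- 	# dependencies of a rectangle are strictly smaller in both dimensions, so
-- 	# they are already in the table; missing/invalid rectangles look up as 0.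
-- 	def mex(cand):
-- 		x = 0
-- 		while x in cand:
-- 			x += 1
-- 		return x
--
-- 	g = {}
-- 	for h in range(H):
-- 		for w in range(W):
-- 			g[(h, w, h, w)] = 1 if board[h][w] == '.' else 0
--
-- 	for hs in range(1, H + 1):
-- 		for ws in range(1, W + 1):
-- 			if hs == 1 and ws == 1:
-- 				continue
-- 			for h1 in range(H - hs + 1):
-- 				for w1 in range(W - ws + 1):
-- 					h2, w2 = h1 + hs - 1, w1 + ws - 1
-- 					cand = []
-- 					for h in range(h1, h2 + 1):
-- 						for w in range(w1, w2 + 1):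
-- 							if board[h][w] == 'X':
-- 								continue
-- 							cand.append(g.get((h1, w1, h - 1, w - 1), 0)
-- 								^ g.get((h1, w + 1, h - 1, w2), 0)
-- 								^ g.get((h + 1, w1, h2, w - 1), 0)
-- 								^ g.get((h + 1, w + 1, h2, w2), 0))
-- 					g[(h1, w1, h2, w2)] = mex(cand) if cand else 0
--
-- 	return g.get((0, 0, H - 1, W - 1), 0)
-- ===== Notes on version B (the rewrite author's own statement) =====
-- stated objective: alternative
-- what changed: Replaced the top-down memoized recursion (nested recursive game() calls with a 400x400 memo array and a counting-array mex) with an iterative bottom-up DP that fills a dictionary over all subrectangles ordered by increasing height then width, reading the four already-computed quadrant values with a default of 0, and with a while-loop smallest-absent mex.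
import Mathlib
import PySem

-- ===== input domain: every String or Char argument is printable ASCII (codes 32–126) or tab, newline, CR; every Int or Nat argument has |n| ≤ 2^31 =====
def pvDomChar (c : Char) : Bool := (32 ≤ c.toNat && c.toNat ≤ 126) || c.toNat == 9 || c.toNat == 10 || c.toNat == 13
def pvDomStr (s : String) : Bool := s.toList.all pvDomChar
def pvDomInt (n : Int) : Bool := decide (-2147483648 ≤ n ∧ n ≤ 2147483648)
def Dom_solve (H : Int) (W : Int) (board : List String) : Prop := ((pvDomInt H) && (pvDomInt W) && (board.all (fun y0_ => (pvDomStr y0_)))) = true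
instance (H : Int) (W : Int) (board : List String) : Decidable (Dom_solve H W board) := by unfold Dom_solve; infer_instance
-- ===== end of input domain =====

-- B replaces A's top-down memoized recursion by a bottom-up table fill over subrectangles
-- ordered by increasing height then width (objective: alternative algorithm, same cost).

-- ===== PORT A =====
-- board[h][w]; out-of-range default is irrelevant (Pre_solve excludes those inputs, where Python raises)
def pvCell (board : List String) (h w : Int) : Char :=
  (PySem.Str.pyGet? ((PySem.List.pyGet? board h).getD "") w).getD '?'

-- A's mex scan: "for x in range(len(count)): if not count[x]: return x; return len(count)"
def pvFindZero : List Int → Int → Int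
  | [], k => k
  | c :: rest, k => if c = 0 then k else pvFindZero rest (k + 1)

-- A's "count[num] += 1"
def pvBump (counts : List Int) (num : Int) : List Int :=
  PySem.List.pySetD counts num (PySem.List.pyGetD counts num 0 + 1)

-- A's mex: counting array of size max+1, then first index with count 0
def pvMexCount (seq : List Int) : Int :=
  pvFindZero
    (seq.foldl pvBump
      (List.replicate ((((PySem.List.max? seq (fun x => x)).getD 0) + 1).toNat) (0 : Int))) 0

-- the candidate loop shared by the two ports: for h, for w, skip 'X', xor the four
-- quadrant values obtained from `sub` (A: the recursive call; B: the table lookup)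
def pvCandWith (board : List String) (sub : Int → Int → Int → Int → Int)
    (h1 w1 h2 w2 : Int) : List Int :=
  (PySem.List.pyRange h1 (h2 + 1) 1).flatMap (fun h =>
    (PySem.List.pyRange w1 (w2 + 1) 1).filterMap (fun w =>
      if pvCell board h w = 'X' then none
      else some (PySem.Int.bxor (PySem.Int.bxor (PySem.Int.bxor
        (sub h1 w1 (h - 1) (w - 1))
        (sub h1 (w + 1) (h - 1) w2))
        (sub (h + 1) w1 h2 (w - 1)))
        (sub (h + 1) (w + 1) h2 w2))))

-- A's game(h1, w1, h2, w2); the memo table is elided (pure caching): its precomputed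
-- single-cell entries become the single-cell branch, and fuel makes the recursion
-- structural (fuel ≥ height+width of the rectangle suffices, as proved below).
def pvGame (board : List String) : Nat → Int → Int → Int → Int → Int
  | 0, _, _, _, _ => 0
  | fuel + 1, h1, w1, h2, w2 =>
    if h1 > h2 ∨ w1 > w2 then 0
    else if h1 = h2 ∧ w1 = w2 then (if pvCell board h1 w1 = '.' then 1 else 0)
    else if pvCandWith board (pvGame board fuel) h1 w1 h2 w2 = [] then 0
    else pvMexCount (pvCandWith board (pvGame board fuel) h1 w1 h2 w2)

def solve (H : Int) (W : Int) (board : List String) : Int :=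
  pvGame board (H + W).toNat 0 0 (H - 1) (W - 1)

-- ===== PORT B =====
-- B's mex: "x = 0; while x in cand: x += 1; return x" (the loop ends within |cand|+1 steps)
def pvMexLoop : Nat → Int → List Int → Int
  | 0, x, _ => x
  | fuel + 1, x, s => if x ∈ s then pvMexLoop fuel (x + 1) s else x

def pvMexScan (s : List Int) : Int := pvMexLoop (s.length + 1) 0 s

-- B's inner candidate loop for one rectangle: quadrant values read from the table, default 0
def pvRectValue (board : List String) (g : PySem.Dict (Int × Int × Int × Int) Int)
    (h1 w1 h2 w2 : Int) : Int :=
  if pvCandWith board (fun a b c e => g.getD (a, b, c, e) 0) h1 w1 h2 w2 = [] then 0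
  else pvMexScan (pvCandWith board (fun a b c e => g.getD (a, b, c, e) 0) h1 w1 h2 w2)

def solve_alt (H : Int) (W : Int) (board : List String) : Int :=
  (((PySem.List.pyRange 1 (H + 1) 1).foldl (fun d hs =>
    (PySem.List.pyRange 1 (W + 1) 1).foldl (fun d ws =>
      if hs = 1 ∧ ws = 1 then d
      else (PySem.List.pyRange 0 (H - hs + 1) 1).foldl (fun d h1 =>
        (PySem.List.pyRange 0 (W - ws + 1) 1).foldl (fun d w1 =>
          d.insert (h1, w1, h1 + hs - 1, w1 + ws - 1)
            (pvRectValue board d h1 w1 (h1 + hs - 1) (w1 + ws - 1))) d) d) d)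
    ((PySem.List.pyRange 0 H 1).foldl (fun d h1 =>
      (PySem.List.pyRange 0 W 1).foldl (fun d w1 =>
        d.insert (h1, w1, h1, w1) (if pvCell board h1 w1 = '.' then 1 else 0)) d)
      PySem.Dict.empty)).getD (0, 0, H - 1, W - 1) 0)

-- ===== PRECONDITION & SPEC =====
-- Pre_solve excludes exactly the inputs where Python A raises IndexError: with H ≥ 1 and
-- W ≥ 1 it indexes a fixed 400×400 memo array at h*W+w (so it needs H*W ≤ 400) and reads
-- board[h][w] for all h < H, w < W (so board needs H rows of length ≥ W).
def Pre_solve (H : Int) (W : Int) (board : List String) : Prop :=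
  (1 ≤ H ∧ 1 ≤ W) →
    (H * W ≤ 400 ∧ H ≤ (board.length : Int) ∧
      ∀ s ∈ board.take H.toNat, W ≤ (s.toList.length : Int))
instance (H : Int) (W : Int) (board : List String) : Decidable (Pre_solve H W board) := by
  unfold Pre_solve; infer_instance

def pvWitness_solve : Int × Int × List String := (2, 2, ["..", ".X"])

def Spec_solve (H : Int) (W : Int) (board : List String) (out : Int) : Prop := out = solve_alt H W board
instance (H : Int) (W : Int) (board : List String) (out : Int) : Decidable (Spec_solve H W board out) := by unfold Spec_solve; infer_instance

-- ===== CLAIM (what is proved, stated in full; the proofs are below) =====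
def Claim_equal_solve : Prop := ∀ (H : Int) (W : Int) (board : List String), Dom_solve H W board → Pre_solve H W board → Spec_solve H W board (solve H W board)

-- ===== LEMMAS AND PROOFS =====

-- rectangle keys (h1, w1, h2, w2)
def pvValid (H W : Int) (k : Int × Int × Int × Int) : Prop :=
  0 ≤ k.1 ∧ k.1 ≤ k.2.2.1 ∧ k.2.2.1 < H ∧ 0 ≤ k.2.1 ∧ k.2.1 ≤ k.2.2.2 ∧ k.2.2.2 < W

def pvNeed (k : Int × Int × Int × Int) : Nat := (k.2.2.1 - k.1 + (k.2.2.2 - k.2.1) + 2).toNat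

def pvG (board : List String) (k : Int × Int × Int × Int) : Int :=
  pvGame board (pvNeed k) k.1 k.2.1 k.2.2.1 k.2.2.2

def pvHgt (k : Int × Int × Int × Int) : Int := k.2.2.1 - k.1
def pvWdt (k : Int × Int × Int × Int) : Int := k.2.2.2 - k.2.1

def pvSingles (H W : Int) : List (Int × Int × Int × Int) :=
  (PySem.List.pyRange 0 H 1).flatMap (fun h1 =>
    (PySem.List.pyRange 0 W 1).map (fun w1 => (h1, w1, h1, w1)))

def pvKeys (H W : Int) : List (Int × Int × Int × Int) :=
  (PySem.List.pyRange 1 (H + 1) 1).flatMap (fun hs =>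
    (PySem.List.pyRange 1 (W + 1) 1).flatMap (fun ws =>
      if hs = 1 ∧ ws = 1 then []
      else (PySem.List.pyRange 0 (H - hs + 1) 1).flatMap (fun h1 =>
        (PySem.List.pyRange 0 (W - ws + 1) 1).map (fun w1 =>
          (h1, w1, h1 + hs - 1, w1 + ws - 1)))))

def pvInv (board : List String) (H W : Int)
    (d : PySem.Dict (Int × Int × Int × Int) Int) (P : List (Int × Int × Int × Int)) : Prop :=
  (∀ k, d.get? k = if k ∈ P then some (pvG board k) else none) ∧
  (∀ k ∈ P, pvValid H W k)

-- ---- small facts ----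

lemma pvGame_invalid (board : List String) (f : Nat) (h1 w1 h2 w2 : Int)
    (h : h1 > h2 ∨ w1 > w2) : pvGame board f h1 w1 h2 w2 = 0 := by
  cases f with
  | zero => rfl
  | succ n => simp only [pvGame, if_pos h]

lemma pvFindZero_ge (c : List Int) : ∀ k : Int, k ≤ pvFindZero c k := by
  induction c with
  | nil => intro k; simp [pvFindZero]
  | cons a rest ih =>
    intro k
    simp only [pvFindZero]
    split
    · exact le_refl k
    · exact le_trans (by omega) (ih (k + 1))

lemma pvMexCount_nonneg (s : List Int) : 0 ≤ pvMexCount s := by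
  unfold pvMexCount
  exact pvFindZero_ge _ 0

lemma pvGame_nonneg (board : List String) (f : Nat) (h1 w1 h2 w2 : Int) :
    0 ≤ pvGame board f h1 w1 h2 w2 := by
  cases f with
  | zero => simp [pvGame]
  | succ n =>
    simp only [pvGame]
    split
    · exact le_refl 0
    · split
      · split <;> omega
      · split
        · exact le_refl 0
        · exact pvMexCount_nonneg _

lemma pvBxor_nonneg {a b : Int} (ha : 0 ≤ a) (hb : 0 ≤ b) : 0 ≤ PySem.Int.bxor a b := by
  rw [PySem.Int.bxor_of_nonneg ha hb]; positivity

lemma pvCandWith_congr (board : List String) (s1 s2 : Int → Int → Int → Int → Int)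
    (h1 w1 h2 w2 : Int)
    (hs : ∀ h w : Int, h1 ≤ h → h ≤ h2 → w1 ≤ w → w ≤ w2 →
      s1 h1 w1 (h - 1) (w - 1) = s2 h1 w1 (h - 1) (w - 1) ∧
      s1 h1 (w + 1) (h - 1) w2 = s2 h1 (w + 1) (h - 1) w2 ∧
      s1 (h + 1) w1 h2 (w - 1) = s2 (h + 1) w1 h2 (w - 1) ∧
      s1 (h + 1) (w + 1) h2 w2 = s2 (h + 1) (w + 1) h2 w2) :
    pvCandWith board s1 h1 w1 h2 w2 = pvCandWith board s2 h1 w1 h2 w2 := by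
  unfold pvCandWith
  apply List.flatMap_congr
  intro h hh
  rw [PySem.List.mem_pyRange_one] at hh
  apply List.filterMap_congr
  intro w hw
  rw [PySem.List.mem_pyRange_one] at hw
  obtain ⟨e1, e2, e3, e4⟩ := hs h w hh.1 (by omega) hw.1 (by omega)
  rw [e1, e2, e3, e4]

lemma pvCandWith_nonneg (board : List String) (s : Int → Int → Int → Int → Int)
    (h1 w1 h2 w2 : Int) (hsub : ∀ a b c e : Int, 0 ≤ s a b c e) :
    ∀ x ∈ pvCandWith board s h1 w1 h2 w2, 0 ≤ x := by
  intro x hx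
  unfold pvCandWith at hx
  simp only [List.mem_flatMap, List.mem_filterMap] at hx
  obtain ⟨h, _, w, _, hw⟩ := hx
  split at hw
  · cases hw
  · simp only [Option.some_inj] at hw
    subst hw
    exact pvBxor_nonneg (pvBxor_nonneg (pvBxor_nonneg (hsub ..) (hsub ..)) (hsub ..)) (hsub ..)

-- ---- fuel irrelevance ----

lemma pvGame_fuel (board : List String) :
    ∀ (f f' : Nat) (h1 w1 h2 w2 : Int),
      pvNeed (h1, w1, h2, w2) ≤ f → pvNeed (h1, w1, h2, w2) ≤ f' →
      pvGame board f h1 w1 h2 w2 = pvGame board f' h1 w1 h2 w2 := by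
  intro f
  induction f with
  | zero =>
    intro f' h1 w1 h2 w2 hf hf'
    have hbad : h1 > h2 ∨ w1 > w2 := by simp only [pvNeed] at hf; omega
    rw [pvGame_invalid _ _ _ _ _ _ hbad, pvGame_invalid _ _ _ _ _ _ hbad]
  | succ n ih =>
    intro f' h1 w1 h2 w2 hf hf'
    by_cases hinv : h1 > h2 ∨ w1 > w2
    · rw [pvGame_invalid _ _ _ _ _ _ hinv, pvGame_invalid _ _ _ _ _ _ hinv]
    · obtain ⟨m, rfl⟩ : ∃ m, f' = m + 1 := by
        cases f' with
        | zero => exfalso; simp only [pvNeed] at hf'; omega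
        | succ m => exact ⟨m, rfl⟩
      have sub : ∀ a b c e : Int,
          (((c - a + (e - b) + 2).toNat ≤ n ∧ (c - a + (e - b) + 2).toNat ≤ m) ∨ (a > c ∨ b > e)) →
          pvGame board n a b c e = pvGame board m a b c e := by
        rintro a b c e (⟨hn, hm⟩ | hbad)
        · exact ih m a b c e hn hm
        · rw [pvGame_invalid _ _ _ _ _ _ hbad, pvGame_invalid _ _ _ _ _ _ hbad]
      have hcand : pvCandWith board (pvGame board n) h1 w1 h2 w2 =
          pvCandWith board (pvGame board m) h1 w1 h2 w2 := by
        apply pvCandWith_congr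
        intro h w hh1 hh2 hw1 hw2
        simp only [pvNeed] at hf hf'
        refine ⟨?_, ?_, ?_, ?_⟩
        · apply sub
          by_cases hv : h1 > h - 1 ∨ w1 > w - 1
          · exact Or.inr hv
          · exact Or.inl (by omega)
        · apply sub
          by_cases hv : h1 > h - 1 ∨ w + 1 > w2
          · exact Or.inr hv
          · exact Or.inl (by omega)
        · apply sub
          by_cases hv : h + 1 > h2 ∨ w1 > w - 1
          · exact Or.inr hv
          · exact Or.inl (by omega)
        · apply sub
          by_cases hv : h + 1 > h2 ∨ w + 1 > w2
          · exact Or.inr hv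
          · exact Or.inl (by omega)
      simp only [pvGame]
      rw [hcand]

-- ---- the common mex value ----

lemma pvMex_exists (s : List Int) : ∃ k : Nat, (k : Int) ∉ s := by
  refine ⟨s.foldl (fun acc y => max acc y.toNat) 0 + 1, fun hmem => ?_⟩
  have := (PySem.List.le_foldl_max_nat s (fun y => y.toNat) 0).2 _ hmem
  omega

def pvMex (s : List Int) : Nat := Nat.find (pvMex_exists s)

lemma pvMex_not_mem (s : List Int) : ((pvMex s : Nat) : Int) ∉ s := Nat.find_spec (pvMex_exists s)

lemma pvMex_mem (s : List Int) {k : Nat} (hk : k < pvMex s) : (k : Int) ∈ s := by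
  have := Nat.find_min (pvMex_exists s) hk
  simpa using this

lemma pvMex_le_length (s : List Int) : pvMex s ≤ s.length := by
  have hsub : ((List.range (pvMex s)).map (fun k : Nat => (k : Int))) ⊆ s := by
    intro x hx
    simp only [List.mem_map, List.mem_range] at hx
    obtain ⟨k, hk, rfl⟩ := hx
    exact pvMex_mem s hk
  have hn : ((List.range (pvMex s)).map (fun k : Nat => (k : Int))).Nodup :=
    List.Nodup.map (fun a b hab => by exact_mod_cast hab) (List.nodup_range)
  have h2 : ((List.range (pvMex s)).map (fun k : Nat => (k : Int))).toFinset.card ≤ s.toFinset.card :=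
    Finset.card_le_card (fun x hx => by
      rw [List.mem_toFinset] at *; exact hsub hx)
  rw [List.toFinset_card_of_nodup hn] at h2
  simp only [List.length_map, List.length_range] at h2
  exact h2.trans s.toFinset_card_le

lemma pvMexLoop_eq (s : List Int) :
    ∀ (fuel j : Nat), pvMex s - j < fuel → j ≤ pvMex s →
      pvMexLoop fuel (j : Int) s = ((pvMex s : Nat) : Int) := by
  intro fuel
  induction fuel with
  | zero => intro j h1 h2; omega
  | succ n ih =>
    intro j h1 h2
    simp only [pvMexLoop]
    by_cases hj : j = pvMex s
    · subst hj
      rw [if_neg (pvMex_not_mem s)]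
    · rw [if_pos (pvMex_mem s (by omega))]
      have := ih (j + 1) (by omega) (by omega)
      rw [show ((j : Int) + 1) = ((j + 1 : Nat) : Int) by push_cast; ring]
      exact this

lemma pvMexScan_eq (s : List Int) : pvMexScan s = ((pvMex s : Nat) : Int) := by
  unfold pvMexScan
  have := pvMexLoop_eq s (s.length + 1) 0 (by have := pvMex_le_length s; omega) (by omega)
  simpa using this

lemma pvFindZero_spec :
    ∀ (c : List Int) (n : Nat) (k : Int),
      (∀ i : Nat, i < n → c.getD i 0 ≠ 0) →
      (n = c.length ∨ (n < c.length ∧ c.getD n 0 = 0)) →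
      pvFindZero c k = k + n := by
  intro c
  induction c with
  | nil =>
    intro n k h1 h2
    have hz : n = 0 := by
      rcases h2 with h | h
      · simpa using h
      · exfalso; have := h.1; simp at this
    subst hz; simp [pvFindZero]
  | cons a rest ih =>
    intro n k h1 h2
    simp only [pvFindZero]
    cases n with
    | zero =>
      rcases h2 with h | h
      · simp at h
      · simp only [List.getD_cons_zero] at h
        rw [if_pos h.2]; ring
    | succ n' =>
      have ha : a ≠ 0 := by
        have := h1 0 (by omega)
        simpa using this
      rw [if_neg ha]
      have := ih n' (k + 1) (fun i hi => by
          have := h1 (i + 1) (by omega)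
          simpa using this)
        (by rcases h2 with h | h
            · left; simpa using h
            · right; constructor
              · simpa using h.1
              · simpa using h.2)
      rw [this]; push_cast; ring

lemma pvBumpFold (t : List Int) :
    ∀ (c : List Int), (∀ x ∈ t, 0 ≤ x ∧ x.toNat < c.length) →
      (t.foldl pvBump c).length = c.length ∧
      ∀ i : Nat, i < c.length → (t.foldl pvBump c).getD i 0 = c.getD i 0 + (t.count (i : Int) : Int) := by
  induction t with
  | nil => intro c _; simp
  | cons x t' ih =>
    intro c hc
    obtain ⟨hx0, hxlt⟩ := hc x (List.mem_cons_self)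
    have hb : pvBump c x = c.set x.toNat (c.getD x.toNat 0 + 1) := by
      unfold pvBump
      rw [PySem.List.pySetD_of_nonneg _ _ hx0,
        PySem.List.pyGetD_eq_getElem _ _ hx0 (by push_cast; omega)]
      rw [List.getD_eq_getElem c 0 hxlt]
    have hlen : (pvBump c x).length = c.length := by rw [hb]; simp
    have hrec := ih (pvBump c x) (fun y hy => ⟨(hc y (List.mem_cons_of_mem _ hy)).1,
      by rw [hlen]; exact (hc y (List.mem_cons_of_mem _ hy)).2⟩)
    simp only [List.foldl_cons]
    refine ⟨by rw [hrec.1, hlen], fun i hi => ?_⟩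
    rw [hrec.2 i (by rw [hlen]; exact hi)]
    have hget : (pvBump c x).getD i 0 = if x.toNat = i then c.getD i 0 + 1 else c.getD i 0 := by
      rw [hb]
      by_cases hxi : x.toNat = i
      · subst hxi
        rw [if_pos rfl, List.getD_eq_getElem _ _ (by simpa using hxlt), List.getElem_set_self]
      · rw [if_neg hxi]
        by_cases hi' : i < c.length
        · rw [List.getD_eq_getElem _ _ (by simpa using hi'),
            List.getD_eq_getElem _ _ hi', List.getElem_set_ne (by simpa using hxi)]
        · rw [List.getD_eq_default _ _ (by simpa using hi'), List.getD_eq_default _ _ (by omega)]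
    rw [hget, List.count_cons]
    by_cases hxi : x.toNat = i
    · have hxe : x = (i : Int) := by omega
      subst hxe
      rw [if_pos hxi]
      simp only [beq_self_eq_true, if_true]
      push_cast
      ring
    · rw [if_neg hxi]
      have hxe : (x == (i : Int)) = false := by
        simp only [beq_eq_false_iff_ne, ne_eq]
        omega
      rw [hxe]
      simp only [Bool.false_eq_true, if_false]
      push_cast
      ring

lemma pvMexCount_eq (s : List Int) (hne : s ≠ []) (hpos : ∀ x ∈ s, 0 ≤ x) :
    pvMexCount s = ((pvMex s : Nat) : Int) := by
  obtain ⟨m, hm⟩ : ∃ m, PySem.List.max? s (fun x => x) = some m := by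
    rcases h : PySem.List.max? s (fun x => x) with _ | m
    · rw [PySem.List.max?_eq_none_iff] at h; exact absurd h hne
    · exact ⟨m, rfl⟩
  have hmmem : m ∈ s := PySem.List.max?_mem hm
  have hmax : ∀ y ∈ s, y ≤ m := fun y hy => PySem.List.max?_isMax hm y hy
  have hm0 : 0 ≤ m := hpos m hmmem
  unfold pvMexCount
  rw [hm]
  simp only [Option.getD_some]
  set N := (m + 1).toNat with hNdef
  have hN : N = m.toNat + 1 := by omega
  have hfold := pvBumpFold s (List.replicate N (0 : Int)) (fun x hx => by
    refine ⟨hpos x hx, ?_⟩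
    have := hmax x hx
    simp only [List.length_replicate]
    omega)
  have hlen : (s.foldl pvBump (List.replicate N (0 : Int))).length = N := by
    rw [hfold.1, List.length_replicate]
  have hcnt : ∀ i : Nat, i < N →
      (s.foldl pvBump (List.replicate N (0 : Int))).getD i 0 = (s.count (i : Int) : Int) := by
    intro i hi
    rw [hfold.2 i (by simpa using hi)]
    rw [List.getD_eq_getElem _ _ (by simpa using hi)]
    simp
  have hmexle : pvMex s ≤ N := by
    by_contra hcon
    push Not at hcon
    have h1 := pvMex_mem s hcon
    have h2 := hmax _ h1
    omega
  have hscan := pvFindZero_spec (s.foldl pvBump (List.replicate N (0 : Int))) (pvMex s) 0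
    (fun i hi => by
      rw [hcnt i (by omega)]
      have hmem := pvMex_mem s hi
      rw [← List.count_pos_iff] at hmem
      intro hcontra
      omega)
    (by
      by_cases hcase : pvMex s = N
      · left; rw [hlen, hcase]
      · right
        refine ⟨by rw [hlen]; omega, ?_⟩
        rw [hcnt _ (by omega)]
        have hnm := pvMex_not_mem s
        rw [← List.count_eq_zero] at hnm
        rw [hnm]
        rfl)
  rw [hscan]
  ring

-- ---- one bottom-up step computes the game value ----

lemma pvRectValue_eq (board : List String) (H W : Int)
    (d : PySem.Dict (Int × Int × Int × Int) Int) (P : List (Int × Int × Int × Int))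
    (r : Int × Int × Int × Int)
    (hinv : pvInv board H W d P)
    (hv : pvValid H W r)
    (hns : ¬(r.1 = r.2.2.1 ∧ r.2.1 = r.2.2.2)) 
    (hdeps : ∀ q, pvValid H W q → pvHgt q < pvHgt r → pvWdt q < pvWdt r → q ∈ P) :
    pvRectValue board d r.1 r.2.1 r.2.2.1 r.2.2.2 = pvG board r := by
  obtain ⟨h1, w1, h2, w2⟩ := r
  obtain ⟨hv1, hv2, hv3, hv4, hv5, hv6⟩ := hv
  dsimp only at hv1 hv2 hv3 hv4 hv5 hv6 hns hdeps ⊢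
  obtain ⟨f, hf⟩ : ∃ f, pvNeed (h1, w1, h2, w2) = f + 1 := by
    refine ⟨pvNeed (h1, w1, h2, w2) - 1, ?_⟩
    simp only [pvNeed]; omega
  show pvRectValue board d h1 w1 h2 w2 = pvGame board (pvNeed (h1, w1, h2, w2)) h1 w1 h2 w2
  rw [hf]
  have hlook : ∀ a b c e : Int, a ≥ h1 → c ≤ h2 → b ≥ w1 → e ≤ w2 →
      (c - a < h2 - h1) → (e - b < w2 - w1) →
      d.getD (a, b, c, e) 0 = pvGame board f a b c e := by
    intro a b c e ha hc hb he hhgt hwdt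
    by_cases hshape : a > c ∨ b > e
    · have hnv : ¬ pvValid H W (a, b, c, e) := by
        simp only [pvValid]
        omega
      have hnone : d.get? (a, b, c, e) = none := by
        rw [hinv.1]
        rw [if_neg (fun hmem => hnv (hinv.2 _ hmem))]
      rw [PySem.Dict.getD_eq_get?_getD, hnone, pvGame_invalid _ _ _ _ _ _ hshape]
      rfl
    · push Not at hshape
      have hq : pvValid H W (a, b, c, e) := by
        simp only [pvValid]
        omega
      have hmem := hdeps (a, b, c, e) hq (by simp only [pvHgt]; omega) (by simp only [pvWdt]; omega)
      rw [PySem.Dict.getD_eq_get?_getD, hinv.1, if_pos hmem]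
      unfold pvG
      dsimp only
      rw [Option.getD_some]
      exact pvGame_fuel board _ f a b c e (le_refl _) (by simp only [pvNeed] at hf ⊢; omega)
  have hcand : pvCandWith board (fun a b c e => d.getD (a, b, c, e) 0) h1 w1 h2 w2 =
      pvCandWith board (pvGame board f) h1 w1 h2 w2 := by
    apply pvCandWith_congr
    intro h w hh1 hh2 hw1 hw2
    exact ⟨hlook h1 w1 (h - 1) (w - 1) (by omega) (by omega) (by omega) (by omega) (by omega) (by omega),
      hlook h1 (w + 1) (h - 1) w2 (by omega) (by omega) (by omega) (by omega) (by omega) (by omega),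
      hlook (h + 1) w1 h2 (w - 1) (by omega) (by omega) (by omega) (by omega) (by omega) (by omega),
      hlook (h + 1) (w + 1) h2 w2 (by omega) (by omega) (by omega) (by omega) (by omega) (by omega)⟩
  simp only [pvRectValue, pvGame]
  rw [if_neg (by omega : ¬(h1 > h2 ∨ w1 > w2)), if_neg hns, hcand]
  split
  · rfl
  · rename_i hnemp
    rw [pvMexScan_eq, pvMexCount_eq _ hnemp
      (pvCandWith_nonneg board _ h1 w1 h2 w2 (fun a b c e => pvGame_nonneg board f a b c e))]

-- ---- the invariant survives one insert and a whole fold ----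

lemma pvInv_insert (board : List String) (H W : Int)
    (d : PySem.Dict (Int × Int × Int × Int) Int) (P : List (Int × Int × Int × Int))
    (r : Int × Int × Int × Int) (hinv : pvInv board H W d P) (hv : pvValid H W r) :
    pvInv board H W (d.insert r (pvG board r)) (P ++ [r]) := by
  constructor
  · intro k
    rw [PySem.Dict.get?_insert]
    by_cases hk : k = r
    · subst hk
      rw [if_pos rfl, if_pos (by simp)]
    · rw [if_neg hk, hinv.1]
      by_cases hmem : k ∈ P
      · rw [if_pos hmem, if_pos (by simp [hmem])]
      · rw [if_neg hmem, if_neg (by simp [hmem, hk])]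
  · intro k hk
    rcases List.mem_append.1 hk with h | h
    · exact hinv.2 k h
    · simp only [List.mem_singleton] at h
      subst h; exact hv

lemma pvFold_inv (board : List String) (H W : Int) :
    ∀ (L : List (Int × Int × Int × Int)) (d : PySem.Dict (Int × Int × Int × Int) Int)
      (P : List (Int × Int × Int × Int)),
      pvInv board H W d P →
      (∀ r ∈ L, pvValid H W r ∧ ¬(r.1 = r.2.2.1 ∧ r.2.1 = r.2.2.2)) →
      L.Pairwise (fun a b => pvHgt a ≤ pvHgt b) →
      (∀ r ∈ L, ∀ q, pvValid H W q → pvHgt q < pvHgt r → pvWdt q < pvWdt r → (q ∈ P ∨ q ∈ L)) →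
      pvInv board H W
        (L.foldl (fun d r => d.insert r (pvRectValue board d r.1 r.2.1 r.2.2.1 r.2.2.2)) d)
        (P ++ L) := by
  intro L
  induction L with
  | nil => intro d P hinv _ _ _; simpa using hinv
  | cons r t ih =>
    intro d P hinv hvalid hsort hdeps
    have hrv := hvalid r (List.mem_cons_self)
    have hrdeps : ∀ q, pvValid H W q → pvHgt q < pvHgt r → pvWdt q < pvWdt r → q ∈ P := by
      intro q hq hh hw
      rcases hdeps r (List.mem_cons_self) q hq hh hw with h | h
      · exact h
      · rcases List.mem_cons.1 h with h | h
        · subst h; omega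
        · have := (List.pairwise_cons.1 hsort).1 q h
          omega
    have hval := pvRectValue_eq board H W d P r hinv hrv.1 hrv.2 hrdeps
    have hinv' : pvInv board H W (d.insert r (pvRectValue board d r.1 r.2.1 r.2.2.1 r.2.2.2))
        (P ++ [r]) := by
      rw [hval]
      exact pvInv_insert board H W d P r hinv hrv.1
    have hres := ih (d.insert r (pvRectValue board d r.1 r.2.1 r.2.2.1 r.2.2.2)) (P ++ [r]) hinv'
      (fun q hq => hvalid q (List.mem_cons_of_mem _ hq))
      (List.pairwise_cons.1 hsort).2
      (fun x hx q hq hh hw => by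
        rcases hdeps x (List.mem_cons_of_mem _ hx) q hq hh hw with h | h
        · left; exact List.mem_append_left _ h
        · rcases List.mem_cons.1 h with h | h
          · left; subst h; simp
          · right; exact h)
    simpa [List.append_assoc] using hres

-- ---- the singles table ----

lemma pvFoldl_insert_get? (F : (Int × Int × Int × Int) → Int) :
    ∀ (L : List (Int × Int × Int × Int)) (d : PySem.Dict (Int × Int × Int × Int) Int)
      (k : Int × Int × Int × Int),
      (L.foldl (fun d r => d.insert r (F r)) d).get? k = if k ∈ L then some (F k) else d.get? k := by
  intro L
  induction L with
  | nil => intro d k; simp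
  | cons r t ih =>
    intro d k
    simp only [List.foldl_cons]
    rw [ih]
    by_cases hk : k ∈ t
    · rw [if_pos hk, if_pos (List.mem_cons_of_mem _ hk)]
    · rw [if_neg hk, PySem.Dict.get?_insert]
      by_cases hkr : k = r
      · subst hkr; rw [if_pos rfl, if_pos (List.mem_cons_self)]
      · rw [if_neg hkr, if_neg (by simp [hk, hkr])]

lemma pvG_single (board : List String) (h w : Int) :
    pvG board (h, w, h, w) = (if pvCell board h w = '.' then 1 else 0) := by
  unfold pvG pvNeed
  dsimp only
  rw [show (h - h + (w - w) + 2).toNat = 1 + 1 by omega]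
  simp [pvGame]

lemma pvMem_singles (H W : Int) (k : Int × Int × Int × Int) :
    k ∈ pvSingles H W ↔ (∃ h w : Int, k = (h, w, h, w) ∧ 0 ≤ h ∧ h < H ∧ 0 ≤ w ∧ w < W) := by
  unfold pvSingles
  simp only [List.mem_flatMap, List.mem_map, PySem.List.mem_pyRange_one]
  constructor
  · rintro ⟨h, ⟨hh1, hh2⟩, w, ⟨hw1, hw2⟩, rfl⟩
    exact ⟨h, w, rfl, hh1, hh2, hw1, hw2⟩
  · rintro ⟨h, w, rfl, hh1, hh2, hw1, hw2⟩
    exact ⟨h, ⟨hh1, hh2⟩, w, ⟨hw1, hw2⟩, rfl⟩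

lemma pvMem_keys (H W : Int) (k : Int × Int × Int × Int) :
    k ∈ pvKeys H W ↔ (pvValid H W k ∧ ¬(k.1 = k.2.2.1 ∧ k.2.1 = k.2.2.2)) := by
  unfold pvKeys
  simp only [List.mem_flatMap, PySem.List.mem_pyRange_one]
  constructor
  · rintro ⟨hs, ⟨hhs1, hhs2⟩, ws, ⟨hws1, hws2⟩, hmem2⟩
    by_cases hone : hs = 1 ∧ ws = 1
    · rw [if_pos hone] at hmem2; simp at hmem2
    · rw [if_neg hone] at hmem2
      simp only [List.mem_flatMap, List.mem_map, PySem.List.mem_pyRange_one] at hmem2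
      obtain ⟨h1, ⟨hh1, hh2⟩, w1, ⟨hw1, hw2⟩, rfl⟩ := hmem2
      constructor
      · simp only [pvValid]; omega
      · simp only [not_and]; intro hc; omega
  · rintro ⟨⟨hv1, hv2, hv3, hv4, hv5, hv6⟩, hns⟩
    obtain ⟨h1, w1, h2, w2⟩ := k
    dsimp only at hv1 hv2 hv3 hv4 hv5 hv6 hns ⊢
    refine ⟨h2 - h1 + 1, ⟨by omega, by omega⟩, w2 - w1 + 1, ⟨by omega, by omega⟩, ?_⟩
    rw [if_neg (by simp only [not_and]; intro hc; omega)]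
    simp only [List.mem_flatMap, List.mem_map, PySem.List.mem_pyRange_one]
    refine ⟨h1, ⟨by omega, by omega⟩, w1, ⟨by omega, by omega⟩, ?_⟩
    simp only [Prod.mk.injEq, true_and]
    exact ⟨by omega, by omega⟩

-- all keys of one (hs, ws)-block have height hs - 1
lemma pvBlock_hgt (H W hs : Int) (r : Int × Int × Int × Int)
    (hr : r ∈ (PySem.List.pyRange 1 (W + 1) 1).flatMap (fun ws =>
      if hs = 1 ∧ ws = 1 then []
      else (PySem.List.pyRange 0 (H - hs + 1) 1).flatMap (fun h1 =>
        (PySem.List.pyRange 0 (W - ws + 1) 1).map (fun w1 =>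
          (h1, w1, h1 + hs - 1, w1 + ws - 1))))) :
    pvHgt r = hs - 1 := by
  simp only [List.mem_flatMap] at hr
  obtain ⟨ws, _, hmem⟩ := hr
  split at hmem
  · simp at hmem
  · simp only [List.mem_flatMap, List.mem_map] at hmem
    obtain ⟨h1, _, w1, _, rfl⟩ := hmem
    simp only [pvHgt]
    ring

lemma pvKeys_sorted (H W : Int) : (pvKeys H W).Pairwise (fun a b => pvHgt a ≤ pvHgt b) := by
  unfold pvKeys
  rw [List.pairwise_flatMap]
  constructor
  · intro hs _
    refine List.Pairwise.imp_of_mem (fun {a b} ha hb _ => ?_)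
      (List.pairwise_of_forall_mem_list (fun a _ b _ => trivial))
    rw [pvBlock_hgt H W hs a ha, pvBlock_hgt H W hs b hb]
  · refine (PySem.List.pairwise_lt_pyRange_one (a := 1) (b := H + 1)).imp ?_
    intro hs hs' hlt a ha b hb
    rw [pvBlock_hgt H W hs a ha, pvBlock_hgt H W hs' b hb]
    omega

-- ---- rewriting solve_alt as a flat fold ----

lemma pvFoldl_flatMap {α β γ : Type} (f : α → List β) (g : γ → β → γ) (l : List α) (c : γ) :
    (l.flatMap f).foldl g c = l.foldl (fun c a => (f a).foldl g c) c := by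
  induction l generalizing c with
  | nil => rfl
  | cons a t ih => simp [List.flatMap_cons, List.foldl_append, ih]

lemma pvIfFold {γ δ : Type} (c : Prop) [Decidable c] (l : List δ) (g : γ → δ → γ) (d : γ) :
    ((if c then ([] : List δ) else l).foldl g d) = if c then d else l.foldl g d := by
  split <;> rfl

lemma pvSolve_alt_eq (H W : Int) (board : List String) :
    solve_alt H W board =
      ((pvKeys H W).foldl (fun d r => d.insert r (pvRectValue board d r.1 r.2.1 r.2.2.1 r.2.2.2))
        ((pvSingles H W).foldl (fun d r =>
          d.insert r (if pvCell board r.1 r.2.1 = '.' then 1 else 0)) PySem.Dict.empty)).getD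
        (0, 0, H - 1, W - 1) 0 := by
  unfold solve_alt pvKeys pvSingles
  simp only [pvFoldl_flatMap, List.foldl_map, pvIfFold]

-- ===== VERDICT (by name: the statement is the Claim_ definition above) =====
theorem solve_spec : Claim_equal_solve := by
  intro H W board _ _
  unfold Spec_solve
  have hinv0 : pvInv board H W
      ((pvSingles H W).foldl (fun d r =>
        d.insert r (if pvCell board r.1 r.2.1 = '.' then 1 else 0)) PySem.Dict.empty)
      (pvSingles H W) := by
    constructor
    · intro k
      rw [pvFoldl_insert_get? (fun r => if pvCell board r.1 r.2.1 = '.' then 1 else 0)]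
      by_cases hk : k ∈ pvSingles H W
      · rw [if_pos hk, if_pos hk]
        obtain ⟨h, w, rfl, _⟩ := (pvMem_singles H W k).1 hk
        rw [pvG_single]
      · rw [if_neg hk, if_neg hk, PySem.Dict.get?_empty]
    · intro k hk
      obtain ⟨h, w, rfl, hb1, hb2, hb3, hb4⟩ := (pvMem_singles H W k).1 hk
      simp only [pvValid]
      omega
  have hinv := pvFold_inv board H W (pvKeys H W) _ (pvSingles H W) hinv0
    (fun r hr => (pvMem_keys H W r).1 hr)
    (pvKeys_sorted H W)
    (fun r hr q hq hqh hqw => by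
      by_cases hsq : q.1 = q.2.2.1 ∧ q.2.1 = q.2.2.2
      · left
        obtain ⟨a, b, c, e⟩ := q
        obtain ⟨hv1, hv2, hv3, hv4, hv5, hv6⟩ := hq
        dsimp only at hsq hv1 hv2 hv3 hv4 hv5 hv6
        rw [pvMem_singles]
        refine ⟨a, b, ?_, by omega, by omega, by omega, by omega⟩
        simp only [Prod.mk.injEq, true_and]
        exact ⟨by omega, by omega⟩
      · right; exact (pvMem_keys H W q).2 ⟨hq, hsq⟩)
  rw [pvSolve_alt_eq, PySem.Dict.getD_eq_get?_getD, hinv.1]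
  by_cases hfull : pvValid H W (0, 0, H - 1, W - 1)
  · have hmem : (0, 0, H - 1, W - 1) ∈ pvSingles H W ++ pvKeys H W := by
      obtain ⟨hv1, hv2, hv3, hv4, hv5, hv6⟩ := hfull
      dsimp only at hv1 hv2 hv3 hv4 hv5 hv6
      by_cases hsq : H - 1 = (0 : Int) ∧ W - 1 = (0 : Int)
      · apply List.mem_append_left
        rw [pvMem_singles]
        refine ⟨0, 0, ?_, by omega, by omega, by omega, by omega⟩
        simp only [Prod.mk.injEq, true_and]
        exact ⟨by omega, by omega⟩
      · apply List.mem_append_right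
        rw [pvMem_keys]
        refine ⟨⟨hv1, hv2, hv3, hv4, hv5, hv6⟩, ?_⟩
        intro hc
        obtain ⟨hc1, hc2⟩ := hc
        dsimp only at hc1 hc2
        simp only [not_and] at hsq
        exact hsq (by omega) (by omega)
    rw [if_pos hmem, Option.getD_some]
    unfold solve pvG
    congr 1
    simp only [pvNeed]
    omega
  · have hmem : (0, 0, H - 1, W - 1) ∉ pvSingles H W ++ pvKeys H W := by
      intro hmem
      rcases List.mem_append.1 hmem with h | h
      · obtain ⟨a, b, heq, hb1, hb2, hb3, hb4⟩ := (pvMem_singles H W _).1 h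
        apply hfull
        simp only [Prod.mk.injEq] at heq
        simp only [pvValid]
        omega
      · exact hfull ((pvMem_keys H W _).1 h).1
    rw [if_neg hmem]
    unfold solve
    rw [pvGame_invalid]
    · rfl
    · simp only [pvValid, not_and_or] at hfull
      omega
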